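-- pv_equiv track=rewrite | github.com/rvx-etri/rvx_synthesizer_obfuscated | generate_ip_instance_info.py | get_library_core_name
-- ===== SOURCE A (Python) =====
-- def get_library_core_name(library_name:str):
--   hier_name_list = library_name.split('_')
--   library_core_name_list = []
--   for hier_name in hier_name_list:
--     if hier_name.startswith('mmiox'):
--       break
--     else:
--       library_core_name_list.append(hier_name)
--   return '_'.join(library_core_name_list)
-- ===== SOURCE B (Python) =====
-- def get_library_core_name(library_name: str):
--   # Cut the string at the first segment-boundary occurrence of 'mmiox'
--   # instead of splitting on '_' and looping over segments.
--   if library_name.startswith('mmiox'):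
--     return ''
--   i = library_name.find('_mmiox')
--   return library_name if i == -1 else library_name[:i]
-- ===== Notes on version B (the rewrite author's own statement) =====
-- stated objective: simpler
-- what changed: B drops A's split-on-underscore list, per-segment loop and rejoin: it returns empty if the marker opens the string, otherwise slices at the first underscore-preceded occurrence of the marker found by one substring search.
import Mathlib
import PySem

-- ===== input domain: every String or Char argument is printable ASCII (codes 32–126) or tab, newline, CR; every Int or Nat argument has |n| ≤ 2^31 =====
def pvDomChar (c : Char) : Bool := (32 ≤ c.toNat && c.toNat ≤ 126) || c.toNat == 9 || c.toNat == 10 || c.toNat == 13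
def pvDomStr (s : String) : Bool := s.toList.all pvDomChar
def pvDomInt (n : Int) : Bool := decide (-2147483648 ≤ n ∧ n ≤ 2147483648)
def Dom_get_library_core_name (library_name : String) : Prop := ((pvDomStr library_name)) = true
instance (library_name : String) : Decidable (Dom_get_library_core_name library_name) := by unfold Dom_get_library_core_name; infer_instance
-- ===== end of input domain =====

-- B replaces A's split-on-'_' + per-segment loop by a single substring search
-- ('mmiox' at position 0, else the first '_mmiox') and one slice: simpler, same result.

-- ===== PORT A =====
-- the 'for hier_name in hier_name_list: if … break else append' loop
def pvALoop : List (List Char) → List (List Char)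
  | [] => []
  | h :: t =>
    if PySem.Chars.startswith h ['m', 'm', 'i', 'o', 'x'] then []
    else h :: pvALoop t

def get_library_core_name (library_name : String) : String :=
  -- library_name.split('_'): sep ≠ '', so Chars.splitOn is exact
  let hier_name_list := PySem.Chars.splitOn library_name.toList ['_']
  let library_core_name_list := pvALoop hier_name_list
  String.ofList (PySem.Chars.join ['_'] library_core_name_list)

-- ===== PORT B =====
def get_library_core_name_alt (library_name : String) : String :=
  if PySem.Str.startswith library_name "mmiox" then ""
  else
    let i := PySem.Str.find library_name "_mmiox"
    if i = -1 then library_name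
    else PySem.Str.slice library_name none (some i)

-- ===== PRECONDITION & SPEC =====
def Spec_get_library_core_name (library_name : String) (out : String) : Prop := out = get_library_core_name_alt library_name
instance (library_name : String) (out : String) : Decidable (Spec_get_library_core_name library_name out) := by unfold Spec_get_library_core_name; infer_instance

-- ===== CLAIM (what is proved, stated in full; the proofs are below) =====
def Claim_equal_get_library_core_name : Prop := ∀ (library_name : String), Dom_get_library_core_name library_name → Spec_get_library_core_name library_name (get_library_core_name library_name)

-- ===== LEMMAS AND PROOFS =====

-- reference splitter: library_name.split('_') computed char by char
def pvMySplit : List Char → List (List Char)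
  | [] => [[]]
  | c :: t =>
    if c = '_' then [] :: pvMySplit t
    else (c :: (pvMySplit t).headI) :: (pvMySplit t).tail

-- reference for B: cut just before the first '_' that is followed by "mmiox"
def pvInner : List Char → List Char
  | [] => []
  | c :: t =>
    if c = '_' && List.isPrefixOf ['m', 'm', 'i', 'o', 'x'] t then []
    else c :: pvInner t

theorem pvMySplit_ne_nil (cs : List Char) : pvMySplit cs ≠ [] := by
  cases cs
  · simp [pvMySplit]
  · simp only [pvMySplit]; split <;> simp

theorem pv_go_eq (fuel : Nat) : ∀ (l cur : List Char) (acc : List (List Char)),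
    l.length < fuel →
    PySem.Chars.splitOn.go ['_'] fuel l cur acc =
      acc.reverse ++ ((cur.reverse ++ (pvMySplit l).headI) :: (pvMySplit l).tail) := by
  induction fuel with
  | zero => intro l cur acc h; omega
  | succ f ih =>
    intro l cur acc h
    cases l with
    | nil => simp [PySem.Chars.splitOn.go, pvMySplit]
    | cons c rest =>
      by_cases hc : c = '_'
      · subst hc
        have : List.isPrefixOf ['_'] ('_' :: rest) = true := by simp [List.isPrefixOf]
        rw [PySem.Chars.splitOn.go]
        simp only [this, if_pos]
        rw [show List.drop ['_'].length ('_' :: rest) = rest from rfl]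
        rw [ih rest [] (cur.reverse :: acc) (by simpa using Nat.lt_of_succ_lt_succ h)]
        obtain ⟨h0, t0, hht⟩ : ∃ h0 t0, pvMySplit rest = h0 :: t0 := by
          cases hx : pvMySplit rest with
          | nil => exact absurd hx (pvMySplit_ne_nil rest)
          | cons a b => exact ⟨a, b, rfl⟩
        simp [pvMySplit, hht]
      · have : List.isPrefixOf ['_'] (c :: rest) = false := by
          simp only [List.isPrefixOf, Bool.and_true]
          simp only [beq_eq_false_iff_ne, ne_eq]
          exact fun h' => hc h'.symm
        rw [PySem.Chars.splitOn.go]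
        simp only [this, Bool.false_eq_true, if_neg, not_false_iff]
        rw [ih rest (c :: cur) acc (by simpa using Nat.lt_of_succ_lt_succ h)]
        simp [pvMySplit, hc]

theorem pv_splitOn_eq (cs : List Char) :
    PySem.Chars.splitOn cs ['_'] = pvMySplit cs := by
  rw [PySem.Chars.splitOn, pv_go_eq (cs.length + 1) cs [] [] (by omega)]
  obtain ⟨h0, t0, hht⟩ : ∃ h0 t0, pvMySplit cs = h0 :: t0 := by
    cases hx : pvMySplit cs with
    | nil => exact absurd hx (pvMySplit_ne_nil cs)
    | cons a b => exact ⟨a, b, rfl⟩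
  simp [hht]

theorem pv_headI_prefix (cs : List Char) : (pvMySplit cs).headI <+: cs := by
  induction cs with
  | nil => simp [pvMySplit]
  | cons c t ih =>
    by_cases hc : c = '_'
    · simp [pvMySplit, hc]
    · simpa [pvMySplit, hc] using ih

theorem pv_prefix_headI (l : List Char) : ∀ (cs : List Char), (∀ c ∈ l, c ≠ '_') →
    l <+: cs → l <+: (pvMySplit cs).headI := by
  induction l with
  | nil => intro cs _ _; exact List.nil_prefix
  | cons a l' ih =>
    intro cs hl hp
    cases cs with
    | nil => exact absurd (List.eq_nil_of_prefix_nil hp) (by simp)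
    | cons b t =>
      rw [List.cons_prefix_cons] at hp
      obtain ⟨rfl, hp'⟩ := hp
      have ha : a ≠ '_' := hl a (by simp)
      have := ih t (fun c hc => hl c (by simp [hc])) hp'
      simpa [pvMySplit, ha, List.cons_prefix_cons] using this

-- decomposition cs = h ++ '_' :: t with h underscore-free
theorem pv_split_at_underscore (cs : List Char) (h : '_' ∈ cs) :
    ∃ h' t, (∀ c ∈ h', c ≠ '_') ∧ cs = h' ++ '_' :: t := by
  induction cs with
  | nil => simp at h
  | cons c t ih =>
    by_cases hc : c = '_'
    · exact ⟨[], t, by simp, by simp [hc]⟩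
    · have : '_' ∈ t := by
        rcases List.mem_cons.mp h with h | h
        · exact absurd h.symm hc
        · exact h
      obtain ⟨h', t', hh, rfl⟩ := ih this
      exact ⟨c :: h', t', by simpa [hc] using hh, by simp⟩

theorem pv_mySplit_seg (h' : List Char) (t : List Char) (hh : ∀ c ∈ h', c ≠ '_') :
    pvMySplit (h' ++ '_' :: t) = h' :: pvMySplit t := by
  induction h' with
  | nil => simp [pvMySplit]
  | cons a h'' ih =>
    have ha : a ≠ '_' := hh a (by simp)
    have := ih (fun c hc => hh c (by simp [hc]))
    simp [pvMySplit, ha, this]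

theorem pv_mySplit_free (h' : List Char) (hh : ∀ c ∈ h', c ≠ '_') :
    pvMySplit h' = [h'] := by
  induction h' with
  | nil => simp [pvMySplit]
  | cons a h'' ih =>
    have ha : a ≠ '_' := hh a (by simp)
    have := ih (fun c hc => hh c (by simp [hc]))
    simp [pvMySplit, ha, this]

theorem pv_inner_free (h' : List Char) (hh : ∀ c ∈ h', c ≠ '_') :
    pvInner h' = h' := by
  induction h' with
  | nil => simp [pvInner]
  | cons a h'' ih =>
    have ha : a ≠ '_' := hh a (by simp)
    have := ih (fun c hc => hh c (by simp [hc]))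
    simp [pvInner, ha, this]

theorem pv_inner_seg (h' : List Char) (t : List Char) (hh : ∀ c ∈ h', c ≠ '_') :
    pvInner (h' ++ '_' :: t) =
      if ['m', 'm', 'i', 'o', 'x'] <+: t then h' else h' ++ '_' :: pvInner t := by
  induction h' with
  | nil =>
    by_cases hm : ['m', 'm', 'i', 'o', 'x'] <+: t
    · simp [pvInner, hm, List.isPrefixOf_iff_prefix]
    · simp [pvInner, hm, List.isPrefixOf_iff_prefix]
  | cons a h'' ih =>
    have ha : a ≠ '_' := hh a (by simp)
    have := ih (fun c hc => hh c (by simp [hc]))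
    by_cases hm : ['m', 'm', 'i', 'o', 'x'] <+: t <;>
      simp [pvInner, ha, this, hm]

theorem pv_M_prefix_iff (h' : List Char) (t : List Char) (hh : ∀ c ∈ h', c ≠ '_') :
    (['m', 'm', 'i', 'o', 'x'] <+: (h' ++ '_' :: t)) ↔ ['m', 'm', 'i', 'o', 'x'] <+: h' := by
  constructor
  · have key : ∀ (l h : List Char), (∀ c ∈ l, c ≠ '_') → (∀ c ∈ h, c ≠ '_') →
        l <+: (h ++ '_' :: t) → l <+: h := by
      intro l
      induction l with
      | nil => intro h _ _ _; exact List.nil_prefix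
      | cons a l' ih =>
        intro h hl hhh hp
        cases h with
        | nil =>
          rw [List.nil_append, List.cons_prefix_cons] at hp
          exact absurd hp.1 (hl a (by simp))
        | cons b h'' =>
          rw [List.cons_append, List.cons_prefix_cons] at hp
          obtain ⟨rfl, hp'⟩ := hp
          have := ih h'' (fun c hc => hl c (by simp [hc])) (fun c hc => hhh c (by simp [hc])) hp'
          simpa [List.cons_prefix_cons] using this
    exact fun hp => key _ h' (by intro c hc; fin_cases hc <;> simp) hh hp
  · intro hp
    exact hp.trans (List.prefix_append h' ('_' :: t))

-- A's value, characterised: empty if the string itself starts with "mmiox", else cut at '_mmiox'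
theorem pv_A_char : ∀ (n : Nat) (cs : List Char), cs.length ≤ n →
    PySem.Chars.join ['_'] (pvALoop (pvMySplit cs)) =
      if ['m', 'm', 'i', 'o', 'x'] <+: cs then [] else pvInner cs := by
  intro n
  induction n with
  | zero =>
    intro cs h
    have : cs = [] := List.eq_nil_of_length_eq_zero (Nat.le_zero.mp h)
    subst this
    simp [pvMySplit, pvALoop, pvInner, PySem.Chars.startswith, PySem.Chars.join,
      List.intercalate]
  | succ n ih =>
    intro cs hlen
    by_cases hu : '_' ∈ cs
    · obtain ⟨h', t, hh, rfl⟩ := pv_split_at_underscore cs hu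
      rw [pv_mySplit_seg h' t hh]
      by_cases hM : ['m', 'm', 'i', 'o', 'x'] <+: h'
      · rw [if_pos ((pv_M_prefix_iff h' t hh).mpr hM)]
        have : PySem.Chars.startswith h' ['m', 'm', 'i', 'o', 'x'] = true :=
          (PySem.Chars.startswith_iff _ _).mpr hM
        simp [pvALoop, this, PySem.Chars.join_nil]
      · rw [if_neg (fun h => hM ((pv_M_prefix_iff h' t hh).mp h))]
        have hsw : PySem.Chars.startswith h' ['m', 'm', 'i', 'o', 'x'] = false := by
          cases hx : PySem.Chars.startswith h' ['m', 'm', 'i', 'o', 'x']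
          · rfl
          · exact absurd ((PySem.Chars.startswith_iff _ _).mp hx) hM
        rw [pvALoop, hsw]
        simp only [Bool.false_eq_true, if_neg, not_false_iff]
        obtain ⟨h0, t0, hht⟩ : ∃ h0 t0, pvMySplit t = h0 :: t0 := by
          cases hx : pvMySplit t with
          | nil => exact absurd hx (pvMySplit_ne_nil t)
          | cons a b => exact ⟨a, b, rfl⟩
        have hlent : t.length ≤ n := by
          have := hlen; simp [List.length_append] at this; omega
        rw [pv_inner_seg h' t hh]
        by_cases hMt : ['m', 'm', 'i', 'o', 'x'] <+: t
        · -- the next segment starts with mmiox: the loop stops right after h'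
          have hh0 : ['m', 'm', 'i', 'o', 'x'] <+: h0 := by
            have := pv_prefix_headI ['m', 'm', 'i', 'o', 'x'] t (by intro c hc; fin_cases hc <;> simp) hMt
            rwa [hht] at this
          have : PySem.Chars.startswith h0 ['m', 'm', 'i', 'o', 'x'] = true :=
            (PySem.Chars.startswith_iff _ _).mpr hh0
          rw [hht, pvALoop, this]
          simp [hMt, PySem.Chars.join_singleton]
        · have hh0 : PySem.Chars.startswith h0 ['m', 'm', 'i', 'o', 'x'] = false := by
            cases hx : PySem.Chars.startswith h0 ['m', 'm', 'i', 'o', 'x']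
            · rfl
            · exfalso
              apply hMt
              have := (PySem.Chars.startswith_iff _ _).mp hx
              have hpre : h0 <+: t := by
                have := pv_headI_prefix t; rwa [hht] at this
              exact this.trans hpre
          have hq : pvALoop (pvMySplit t) = h0 :: pvALoop t0 := by
            rw [hht, pvALoop, hh0]; simp
          have hihres : PySem.Chars.join ['_'] (pvALoop (pvMySplit t)) = pvInner t := by
            rw [ih t hlent, if_neg hMt]
          rw [if_neg hMt]
          rw [hq] at hihres ⊢
          rw [PySem.Chars.join_cons_cons]
          rw [hihres]
          simp
    · have hfree : ∀ c ∈ cs, c ≠ '_' := fun c hc he => hu (he ▸ hc)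
      rw [pv_mySplit_free cs hfree]
      by_cases hM : ['m', 'm', 'i', 'o', 'x'] <+: cs
      · have : PySem.Chars.startswith cs ['m', 'm', 'i', 'o', 'x'] = true :=
          (PySem.Chars.startswith_iff _ _).mpr hM
        simp [pvALoop, this, hM, PySem.Chars.join_nil]
      · have : PySem.Chars.startswith cs ['m', 'm', 'i', 'o', 'x'] = false := by
          cases hx : PySem.Chars.startswith cs ['m', 'm', 'i', 'o', 'x']
          · rfl
          · exact absurd ((PySem.Chars.startswith_iff _ _).mp hx) hM
        simp [pvALoop, this, hM, PySem.Chars.join_singleton, pv_inner_free cs hfree]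

theorem pv_isPrefixOf_false {l t : List Char} (h : ¬ l <+: t) : l.isPrefixOf t = false := by
  cases hx : l.isPrefixOf t
  · rfl
  · exact absurd (List.isPrefixOf_iff_prefix.mp hx) h

theorem pv_inner_no_match (cs : List Char)
    (h : ¬ ('_' :: ['m', 'm', 'i', 'o', 'x']) <:+: cs) : pvInner cs = cs := by
  induction cs with
  | nil => simp [pvInner]
  | cons c t ih =>
    have hg : ¬(c = '_' ∧ ['m', 'm', 'i', 'o', 'x'] <+: t) := by
      rintro ⟨rfl, hp⟩
      exact h (List.IsPrefix.isInfix (List.cons_prefix_cons.mpr ⟨rfl, hp⟩))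
    have ht : ¬ ('_' :: ['m', 'm', 'i', 'o', 'x']) <:+: t := fun hx => h (List.infix_cons hx)
    rw [pvInner]
    have hguard : (decide (c = '_') && List.isPrefixOf ['m', 'm', 'i', 'o', 'x'] t) = false := by
      simp only [Bool.and_eq_false_iff, decide_eq_false_iff_not]
      by_cases hc : c = '_'
      · exact Or.inr (pv_isPrefixOf_false (fun hp => hg ⟨hc, hp⟩))
      · exact Or.inl (by simpa using hc)
    rw [hguard]
    simp [ih ht]

theorem pv_inner_match : ∀ (cs : List Char) (k : Nat),
    ('_' :: ['m', 'm', 'i', 'o', 'x']) <+: cs.drop k →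
    (∀ i < k, ¬ ('_' :: ['m', 'm', 'i', 'o', 'x']) <+: cs.drop i) →
    pvInner cs = cs.take k := by
  intro cs
  induction cs with
  | nil =>
    intro k h _
    simp at h
  | cons c t ih =>
    intro k h hmin
    cases k with
    | zero =>
      rw [List.drop_zero, List.cons_prefix_cons] at h
      obtain ⟨rfl, hp⟩ := h
      rw [pvInner]
      have hguard : (decide ('_' = '_') && List.isPrefixOf ['m', 'm', 'i', 'o', 'x'] t) = true := by
        simp [List.isPrefixOf_iff_prefix, hp]
      rw [hguard]
      simp
    | succ k' =>
      have h0 : ¬ ('_' :: ['m', 'm', 'i', 'o', 'x']) <+: (c :: t) := by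
        simpa using hmin 0 (by omega)
      rw [pvInner]
      have hguard : (decide (c = '_') && List.isPrefixOf ['m', 'm', 'i', 'o', 'x'] t) = false := by
        simp only [Bool.and_eq_false_iff, decide_eq_false_iff_not]
        by_cases hc : c = '_'
        · exact Or.inr (pv_isPrefixOf_false (fun hp => h0 (List.cons_prefix_cons.mpr ⟨hc.symm, hp⟩)))
        · exact Or.inl (by simpa using hc)
      rw [hguard]
      simp only [Bool.false_eq_true, if_neg, not_false_iff]
      have ht : pvInner t = t.take k' := by
        apply ih k'
        · simpa using h
        · intro i hi
          simpa using hmin (i + 1) (by omega)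
      rw [ht]
      simp

-- ===== VERDICT (by name: the statement is the Claim_ definition above) =====
theorem get_library_core_name_spec : Claim_equal_get_library_core_name := by
  intro s _
  unfold Spec_get_library_core_name get_library_core_name get_library_core_name_alt
  show String.ofList (PySem.Chars.join ['_'] (pvALoop (PySem.Chars.splitOn s.toList ['_']))) =
    (if PySem.Str.startswith s "mmiox" = true then ""
     else if PySem.Str.find s "_mmiox" = -1 then s
     else PySem.Str.slice s none (some (PySem.Str.find s "_mmiox")))
  rw [pv_splitOn_eq, pv_A_char s.toList.length s.toList le_rfl]
  have hMeq : ("mmiox" : String).toList = ['m', 'm', 'i', 'o', 'x'] := by decide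
  have hUMeq : ("_mmiox" : String).toList = '_' :: ['m', 'm', 'i', 'o', 'x'] := by decide
  by_cases hM : ['m', 'm', 'i', 'o', 'x'] <+: s.toList
  · have : PySem.Str.startswith s "mmiox" = true := by
      simp only [PySem.Str.startswith_eq, hMeq]
      exact (PySem.Chars.startswith_iff _ _).mpr hM
    rw [if_pos hM, this, if_pos rfl]
  · have hsw : PySem.Str.startswith s "mmiox" = false := by
      simp only [PySem.Str.startswith_eq, hMeq]
      cases hx : PySem.Chars.startswith s.toList ['m', 'm', 'i', 'o', 'x']
      · rfl
      · exact absurd ((PySem.Chars.startswith_iff _ _).mp hx) hM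
    rw [if_neg hM, hsw, if_neg Bool.false_ne_true]
    have hfind : PySem.Str.find s "_mmiox" =
        PySem.Chars.find s.toList ('_' :: ['m', 'm', 'i', 'o', 'x']) := by
      simp [PySem.Str.find_eq, hUMeq]
    by_cases hmi : PySem.Chars.find s.toList ('_' :: ['m', 'm', 'i', 'o', 'x']) = -1
    · rw [hfind, if_pos hmi]
      rw [pv_inner_no_match s.toList ((PySem.Chars.find_eq_neg_one_iff _ _).mp hmi)]
      exact String.ofList_toList
    · rw [hfind, if_neg hmi]
      have hpos : 0 ≤ PySem.Chars.find s.toList ('_' :: ['m', 'm', 'i', 'o', 'x']) := by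
        have := PySem.Chars.neg_one_le_find s.toList ('_' :: ['m', 'm', 'i', 'o', 'x'])
        omega
      obtain ⟨hat, hfirst⟩ := PySem.Chars.find_spec hpos
      rw [pv_inner_match s.toList _ hat hfirst]
      apply String.toList_inj.mp
      rw [PySem.Str.toList_slice, PySem.Chars.slice_eq_listSlice,
        PySem.List.slice_to s.toList hpos]
      simp
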